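-- pv_equiv track=rewrite | github.com/HaneenKl/Bachelor-Project | semigroup.py | build_multiplication_table
-- ===== SOURCE A (Python) =====
-- def mul(f, g):
--     return tuple(g[f[q]] for q in range(len(f)))
--
-- def sort_elements(reps):
--     elements = list(reps.keys())
--
--     # find sink element
--     sink = None
--     for z in elements:
--         if all(mul(z, x) == z and mul(x, z) == z for x in elements):
--             sink = z
--             break
--
--     def sort_key(e):
--         if reps[e] == "":
--             return 0, ""
--         if e == sink:
--             return 2, ""
--         return 1, reps[e]
--
--     return sorted(elements, key=sort_key)
--
-- def build_multiplication_table(reps):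
--     elements = sort_elements(reps)
--     table = []
--     for f in elements:
--         row = []
--         for g in elements:
--             fg = mul(f, g)
--             row.append(reps[fg])
--         table.append(row)
--     return table, elements
-- ===== SOURCE B (Python) =====
-- def mul(f, g):
--     return tuple(g[q] for q in f)
--
--
-- def build_multiplication_table(reps):
--     elements = list(reps)
--     # The sink, if one exists, is unique (z1 = mul(z1, z2) = z2), so a linear
--     # candidate-elimination pass followed by one verification pass finds it.
--     sink = None
--     if elements:
--         c = elements[0]
--         for x in elements:
--             if mul(c, x) != c or mul(x, c) != c:
--                 c = x
--         if all(mul(c, x) == c and mul(x, c) == c for x in elements):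
--             sink = c
--     if sink is not None and reps[sink] != "":
--         order = sorted((e for e in elements if e != sink),
--                        key=lambda e: (reps[e] != "", reps[e])) + [sink]
--     else:
--         order = sorted(elements, key=lambda e: (reps[e] != "", reps[e]))
--     table = [[reps[mul(f, g)] for g in order] for f in order]
--     return table, order
-- ===== Notes on version B (the rewrite author's own statement) =====
-- stated objective: alternative
-- what changed: B replaces A's quadratic first-sink scan (test every z against every x) by linear candidate elimination plus one verification pass (correct because an absorbing element is unique), and instead of encoding the sink into a 3-way sort key it sorts only the non-sink elements by the plain (name != '', name) key and appends the sink; mul iterates f directly and the table is built by nested comprehensions.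
import Mathlib
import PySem

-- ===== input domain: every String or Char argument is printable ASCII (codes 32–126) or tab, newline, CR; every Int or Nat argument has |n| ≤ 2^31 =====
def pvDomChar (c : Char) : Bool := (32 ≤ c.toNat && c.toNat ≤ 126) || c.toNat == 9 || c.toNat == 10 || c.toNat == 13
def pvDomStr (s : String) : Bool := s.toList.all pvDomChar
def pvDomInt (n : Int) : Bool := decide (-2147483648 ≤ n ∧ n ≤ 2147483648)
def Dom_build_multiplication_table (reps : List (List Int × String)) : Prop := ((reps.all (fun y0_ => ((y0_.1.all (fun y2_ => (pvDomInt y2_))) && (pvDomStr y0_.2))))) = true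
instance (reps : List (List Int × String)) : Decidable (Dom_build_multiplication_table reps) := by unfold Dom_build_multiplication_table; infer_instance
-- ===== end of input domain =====

-- B finds the unique sink by linear candidate elimination + one verify pass and sorts the non-sink elements then appends the sink (alternative decomposition; equivalence proved on inputs where A raises no exception).


-- ===== PORT A =====
-- A's  mul(f, g) = tuple(g[f[q]] for q in range(len(f)))
-- (defaults 0/"" are never reached inside Pre_, where every index is in range and every product is a key)
def pyMul (f g : List Int) : List Int :=
  (PySem.List.pyRange 0 (f.length : Int) 1).map
    (fun q => PySem.List.pyGetD g (PySem.List.pyGetD f q 0) 0)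

-- A's sink search: first z with mul(z,x) == z and mul(x,z) == z for all x
def sinkOf (elements : List (List Int)) : Option (List Int) :=
  elements.find? (fun z => elements.all (fun x => pyMul z x == z && pyMul x z == z))

-- A's sort_key(e), split into the two tuple components
def keyA1 (d : PySem.Dict (List Int) String) (sink : Option (List Int)) (e : List Int) : Int :=
  if d.getD e "" == "" then 0 else if some e == sink then 2 else 1
def keyA2 (d : PySem.Dict (List Int) String) (sink : Option (List Int)) (e : List Int) : String :=
  if d.getD e "" == "" then "" else if some e == sink then "" else d.getD e ""

def build_multiplication_table (reps : List (List Int × String)) :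
    List (List String) × List (List Int) :=
  let d := PySem.Dict.ofList reps
  let elements := d.keys
  let sink := sinkOf elements
  let els := PySem.List.sorted2 elements (keyA1 d sink) (keyA2 d sink)
  let table := els.foldl (fun table f =>
    table ++ [els.foldl (fun row g => row ++ [d.getD (pyMul f g) ""]) []]) []
  (table, els)

-- ===== PORT B =====
-- B's  mul(f, g) = tuple(g[q] for q in f)
def pyMulB (f g : List Int) : List Int := f.map (fun q => PySem.List.pyGetD g q 0)

-- B's sink search: linear candidate elimination, then one verification pass
def sinkOfB (elements : List (List Int)) : Option (List Int) :=
  match elements with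
  | [] => none
  | e0 :: _ =>
    let c := elements.foldl
      (fun c x => if !(pyMulB c x == c) || !(pyMulB x c == c) then x else c) e0
    if elements.all (fun x => pyMulB c x == c && pyMulB x c == c) then some c else none

-- B's plain sort key  (reps[e] != "", reps[e])
def keyB1 (d : PySem.Dict (List Int) String) (e : List Int) : Int :=
  if d.getD e "" == "" then 0 else 1
def keyB2 (d : PySem.Dict (List Int) String) (e : List Int) : String := d.getD e ""

def build_multiplication_table_alt (reps : List (List Int × String)) :
    List (List String) × List (List Int) :=
  let d := PySem.Dict.ofList reps
  let elements := d.keys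
  let order :=
    match sinkOfB elements with
    | some s =>
      if !(d.getD s "" == "") then
        PySem.List.sorted2 (elements.filter (fun e => !(e == s))) (keyB1 d) (keyB2 d) ++ [s]
      else PySem.List.sorted2 elements (keyB1 d) (keyB2 d)
    | none => PySem.List.sorted2 elements (keyB1 d) (keyB2 d)
  (order.map (fun f => order.map (fun g => d.getD (pyMulB f g) "")), order)

-- ===== PRECONDITION & SPEC =====
-- Pre_ excludes exactly the inputs where Python A raises: an element of some key f that is
-- not a valid Python index into some key g (IndexError), or a product that is not itself a
-- key (KeyError in reps[fg]).
def Pre_build_multiplication_table (reps : List (List Int × String)) : Prop :=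
  ∀ f ∈ (reps.map Prod.fst).dedup, ∀ g ∈ (reps.map Prod.fst).dedup,
    (∀ i ∈ f, -(g.length : Int) ≤ i ∧ i < (g.length : Int)) ∧
      pyMul f g ∈ (reps.map Prod.fst).dedup
instance (reps : List (List Int × String)) : Decidable (Pre_build_multiplication_table reps) := by
  unfold Pre_build_multiplication_table; infer_instance

def pvWitness_build_multiplication_table : (List (List Int × String)) := [([0], "a")]

def Spec_build_multiplication_table (reps : List (List Int × String)) (out : List (List String) × List (List Int)) : Prop := out = build_multiplication_table_alt reps
instance (reps : List (List Int × String)) (out : List (List String) × List (List Int)) : Decidable (Spec_build_multiplication_table reps out) := by unfold Spec_build_multiplication_table; infer_instance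

-- ===== CLAIM (what is proved, stated in full; the proofs are below) =====
def Claim_equal_build_multiplication_table : Prop := ∀ (reps : List (List Int × String)), Dom_build_multiplication_table reps → Pre_build_multiplication_table reps → Spec_build_multiplication_table reps (build_multiplication_table reps)

-- ===== LEMMAS AND PROOFS =====

-- the two mul helpers compute the same product
lemma pyMul_eq : pyMul = pyMulB := by
  funext f g
  unfold pyMul pyMulB
  rw [show (fun q => PySem.List.pyGetD g (PySem.List.pyGetD f q 0) 0) =
        (fun v => PySem.List.pyGetD g v 0) ∘ (fun q => PySem.List.pyGetD f q 0) from rfl,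
      ← List.map_map, PySem.List.map_pyGetD_pyRange_zero']

-- B's candidate stays in the processed material
lemma cand_mem : ∀ (l : List (List Int)) (c : List Int),
    l.foldl (fun c x => if !(pyMulB c x == c) || !(pyMulB x c == c) then x else c) c = c ∨
    l.foldl (fun c x => if !(pyMulB c x == c) || !(pyMulB x c == c) then x else c) c ∈ l := by
  intro l
  induction l with
  | nil => intro c; exact Or.inl rfl
  | cons x t ih =>
    intro c
    simp only [List.foldl_cons]
    rcases ih (if !(pyMulB c x == c) || !(pyMulB x c == c) then x else c) with h | h
    · rw [h]; split
      · exact Or.inr List.mem_cons_self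
      · exact Or.inl rfl
    · exact Or.inr (List.mem_cons_of_mem x h)

-- if a sink z exists, the candidate loop ends at z
lemma cand_sink (E : List (List Int)) (z : List Int)
    (hz : ∀ x ∈ E, pyMulB z x = z ∧ pyMulB x z = z) :
    ∀ (l : List (List Int)) (c : List Int), (∀ x ∈ l, x ∈ E) → c ∈ E → (c = z ∨ z ∈ l) →
      l.foldl (fun c x => if !(pyMulB c x == c) || !(pyMulB x c == c) then x else c) c = z := by
  intro l
  induction l with
  | nil =>
    intro c _ _ h
    rcases h with h | h
    · exact h
    · cases h
  | cons x t ih =>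
    intro c hl hc hcz
    simp only [List.foldl_cons]
    by_cases hce : c = z
    · subst hce
      have hx := hz x (hl x (by simp))
      rw [show (if !(pyMulB c x == c) || !(pyMulB x c == c) then x else c) = c by
        simp [hx.1, hx.2]]
      exact ih c (fun y hy => hl y (by simp [hy])) hc (Or.inl rfl)
    · rcases hcz with h | h
      · exact absurd h hce
      rcases List.mem_cons.mp h with hzx | hzt
      · subst hzx
        have hcz' := (hz c hc).2
        have hzc : (pyMulB c z == c) = false := by
          rw [hcz']; exact beq_eq_false_iff_ne.mpr (fun h => hce h.symm)
        rw [show (if !(pyMulB c z == c) || !(pyMulB z c == c) then z else c) = z by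
          simp [hzc]]
        exact ih z (fun y hy => hl y (by simp [hy])) (hl z (by simp)) (Or.inl rfl)
      · refine ih _ (fun y hy => hl y (by simp [hy])) ?_ (Or.inr hzt)
        split
        · exact hl x (by simp)
        · exact hc

-- find? of a uniquely satisfied predicate
lemma find?_eq_some_of_unique {α : Type} (p : α → Bool) (l : List α) (z : α)
    (hz : z ∈ l) (hp : p z = true) (hu : ∀ y ∈ l, p y = true → y = z) :
    l.find? p = some z := by
  induction l with
  | nil => cases hz
  | cons a t ih =>
    rw [List.find?_cons]
    cases hpa : p a with
    | true => simpa using hu a (by simp) hpa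
    | false =>
      have hzt : z ∈ t := by
        rcases List.mem_cons.mp hz with h | h
        · subst h; rw [hp] at hpa; cases hpa
        · exact h
      exact ih hzt (fun y hy hpy => hu y (by simp [hy]) hpy)

-- A's first-sink scan and B's candidate elimination agree
lemma sink_eq (E : List (List Int)) : sinkOf E = sinkOfB E := by
  unfold sinkOf sinkOfB
  rw [pyMul_eq]
  match E with
  | [] => rfl
  | e0 :: t =>
    simp only
    set E' := e0 :: t with hE'
    set p := fun z => E'.all (fun x => pyMulB z x == z && pyMulB x z == z) with hp
    set c := E'.foldl (fun c x => if !(pyMulB c x == c) || !(pyMulB x c == c) then x else c) e0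
      with hc
    by_cases hex : ∃ z ∈ E', p z = true
    · obtain ⟨z, hzE, hpz⟩ := hex
      have hz : ∀ x ∈ E', pyMulB z x = z ∧ pyMulB x z = z := by
        intro x hx
        have h' := (List.all_eq_true.mp (hp ▸ hpz)) x hx
        simp only [Bool.and_eq_true, beq_iff_eq] at h'
        exact h'
      have hcz : c = z :=
        cand_sink E' z hz E' e0 (fun x hx => hx) (by simp [hE']) (Or.inr hzE)
      have hu : ∀ y ∈ E', p y = true → y = z := by
        intro y hy hpy
        have h1 := ((List.all_eq_true.mp (hp ▸ hpy)) z hzE)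
        have h2 := ((List.all_eq_true.mp (hp ▸ hpz)) y hy)
        simp only [Bool.and_eq_true, beq_iff_eq] at h1 h2
        rw [← h1.1, h2.2]
      rw [find?_eq_some_of_unique p E' z hzE hpz hu, hcz]
      simp [hp ▸ hpz]
    · push Not at hex
      have hfind : E'.find? p = none :=
        List.find?_eq_none.mpr (fun x hx => by simpa using hex x hx)
      have hcE : c ∈ E' := by
        rcases cand_mem E' e0 with h | h
        · rw [← hc] at h; rw [h]; simp [hE']
        · exact hc ▸ h
      have hpc : p c = false := by
        cases h : p c with
        | true => exact absurd h (by simpa using hex c hcE)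
        | false => rfl
      rw [hfind]
      simp only [hp] at hpc
      simp [hpc]

-- the comparator sorted2 uses, with explicit keys
def ltOf (k1 : List Int → Int) (k2 : List Int → String) (a b : List Int) : Bool :=
  decide (k1 a < k1 b) || (!decide (k1 b < k1 a) && decide (k2 a < k2 b))

lemma sorted2_eq_foldl (xs : List (List Int)) (k1 : List Int → Int) (k2 : List Int → String) :
    PySem.List.sorted2 xs k1 k2 =
      xs.foldl (fun acc x => PySem.List.insertBy (ltOf k1 k2) x acc) [] := rfl

-- comparator congruence for insertBy / its fold
lemma insertBy_congr {α : Type} (b1 b2 : α → α → Bool) (x : α) :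
    ∀ (acc : List α), (∀ y ∈ acc, b1 x y = b2 x y) →
      PySem.List.insertBy b1 x acc = PySem.List.insertBy b2 x acc := by
  intro acc
  induction acc with
  | nil => intro _; rfl
  | cons y ys ih =>
    intro h
    simp only [PySem.List.insertBy]
    rw [h y (by simp)]
    split
    · rfl
    · rw [ih (fun y' hy' => h y' (by simp [hy']))]

lemma foldl_insertBy_congr {α : Type} (b1 b2 : α → α → Bool) :
    ∀ (l acc : List α), (∀ x ∈ l, ∀ y, (y ∈ l ∨ y ∈ acc) → b1 x y = b2 x y) →
      l.foldl (fun a x => PySem.List.insertBy b1 x a) acc =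
      l.foldl (fun a x => PySem.List.insertBy b2 x a) acc := by
  intro l
  induction l with
  | nil => intro acc _; rfl
  | cons x t ih =>
    intro acc h
    simp only [List.foldl_cons]
    rw [insertBy_congr b1 b2 x acc (fun y hy => h x (by simp) y (Or.inr hy))]
    refine ih _ (fun x' hx' y hy => ?_)
    rcases hy with hy | hy
    · exact h x' (by simp [hx']) y (Or.inl (by simp [hy]))
    · rcases (PySem.List.mem_insertBy b2 x y acc).mp hy with hy | hy
      · exact h x' (by simp [hx']) y (Or.inl (by simp [hy]))
      · exact h x' (by simp [hx']) y (Or.inr hy)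

-- inserting x (which goes before s) into acc ++ [s] keeps s last
lemma insertBy_last {α : Type} (b : α → α → Bool) (x s : α) (h : b x s = true) :
    ∀ acc, PySem.List.insertBy b x (acc ++ [s]) = PySem.List.insertBy b x acc ++ [s] := by
  intro acc
  induction acc with
  | nil => simp [PySem.List.insertBy, h]
  | cons a t ih =>
    simp only [List.cons_append, PySem.List.insertBy]
    split
    · rfl
    · rw [ih, List.cons_append]

lemma foldl_insertBy_last {α : Type} (b : α → α → Bool) (s : α) :
    ∀ (l acc : List α), (∀ x ∈ l, b x s = true) →
      l.foldl (fun a x => PySem.List.insertBy b x a) (acc ++ [s]) =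
      l.foldl (fun a x => PySem.List.insertBy b x a) acc ++ [s] := by
  intro l
  induction l with
  | nil => intro acc _; rfl
  | cons x t ih =>
    intro acc h
    simp only [List.foldl_cons]
    rw [insertBy_last b x s (h x (by simp)), ih _ (fun y hy => h y (by simp [hy]))]

-- key agreement facts
lemma keyA1_eq_none (d : PySem.Dict (List Int) String) (a : List Int) :
    keyA1 d none a = keyB1 d a := by
  simp [keyA1, keyB1]

lemma keyA2_eq (d : PySem.Dict (List Int) String) (sk : Option (List Int)) (a : List Int)
    (h : (some a == sk) = false) : keyA2 d sk a = keyB2 d a := by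
  unfold keyA2 keyB2
  rw [h]
  split
  · next hh => exact (beq_iff_eq.mp hh).symm
  · rfl

lemma keyA2_eq_none (d : PySem.Dict (List Int) String) (a : List Int) :
    keyA2 d none a = keyB2 d a := keyA2_eq d none a rfl

lemma keyA1_eq_some_ne (d : PySem.Dict (List Int) String) (s a : List Int) (ha : a ≠ s) :
    keyA1 d (some s) a = keyB1 d a := by
  simp [keyA1, keyB1, ha]

lemma keyA2_eq_some_ne (d : PySem.Dict (List Int) String) (s a : List Int) (ha : a ≠ s) :
    keyA2 d (some s) a = keyB2 d a := keyA2_eq d (some s) a (by simp [ha])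

lemma keyA1_eq_some_empty (d : PySem.Dict (List Int) String) (s a : List Int)
    (hs : d.getD s "" = "") : keyA1 d (some s) a = keyB1 d a := by
  by_cases ha : a = s
  · subst ha; simp [keyA1, keyB1, hs]
  · exact keyA1_eq_some_ne d s a ha

lemma keyA2_eq_some_empty (d : PySem.Dict (List Int) String) (s a : List Int)
    (hs : d.getD s "" = "") : keyA2 d (some s) a = keyB2 d a := by
  by_cases ha : a = s
  · subst ha; simp [keyA2, keyB2, hs]
  · exact keyA2_eq_some_ne d s a ha

lemma keyA1_lt_two (d : PySem.Dict (List Int) String) (s a : List Int) (ha : a ≠ s) :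
    keyA1 d (some s) a < 2 := by
  unfold keyA1
  split
  · omega
  · simp [ha]

lemma keyA1_s (d : PySem.Dict (List Int) String) (s : List Int)
    (hs : ¬ d.getD s "" = "") : keyA1 d (some s) s = 2 := by
  simp [keyA1, hs]

lemma ltA_x_s (d : PySem.Dict (List Int) String) (s x : List Int) (hx : x ≠ s)
    (hs : ¬ d.getD s "" = "") :
    ltOf (keyA1 d (some s)) (keyA2 d (some s)) x s = true := by
  have h := keyA1_lt_two d s x hx
  simp [ltOf, keyA1_s d s hs, h]

lemma ltA_s_y (d : PySem.Dict (List Int) String) (s y : List Int) (hy : y ≠ s)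
    (hs : ¬ d.getD s "" = "") :
    ltOf (keyA1 d (some s)) (keyA2 d (some s)) s y = false := by
  have h := keyA1_lt_two d s y hy
  simp [ltOf, keyA1_s d s hs, h, show ¬ (2 : Int) < keyA1 d (some s) y by omega]

-- the central sort lemmas: A's 3-way-keyed sort equals B's sort-then-append
lemma order_eq_none (d : PySem.Dict (List Int) String) (E : List (List Int)) :
    PySem.List.sorted2 E (keyA1 d none) (keyA2 d none) =
      PySem.List.sorted2 E (keyB1 d) (keyB2 d) := by
  rw [sorted2_eq_foldl, sorted2_eq_foldl]
  exact foldl_insertBy_congr _ _ E [] (fun x _ y _ => by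
    simp [ltOf, keyA1_eq_none, keyA2_eq_none])

lemma order_eq_some (d : PySem.Dict (List Int) String) (E : List (List Int)) (hN : E.Nodup)
    (s : List Int) (hsE : s ∈ E) :
    PySem.List.sorted2 E (keyA1 d (some s)) (keyA2 d (some s)) =
      (if !(d.getD s "" == "") then
        PySem.List.sorted2 (E.filter (fun e => !(e == s))) (keyB1 d) (keyB2 d) ++ [s]
      else PySem.List.sorted2 E (keyB1 d) (keyB2 d)) := by
  by_cases hs : d.getD s "" = ""
  · rw [show (!(d.getD s "" == "")) = false by simp [hs]]
    simp only [Bool.false_eq_true, if_false]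
    rw [sorted2_eq_foldl, sorted2_eq_foldl]
    exact foldl_insertBy_congr _ _ E [] (fun x _ y _ => by
      simp [ltOf, keyA1_eq_some_empty d s _ hs, keyA2_eq_some_empty d s _ hs])
  · rw [show (!(d.getD s "" == "")) = true by simp [hs], if_pos rfl]
    obtain ⟨l1, l2, hE⟩ := List.append_of_mem hsE
    subst hE
    have hnd := List.nodup_append.mp hN
    have hs1 : s ∉ l1 := fun h => hnd.2.2 s h s (by simp) rfl
    have hs2 : s ∉ l2 := (List.nodup_cons.mp hnd.2.1).1
    have hfil : (l1 ++ s :: l2).filter (fun e => !(e == s)) = l1 ++ l2 := by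
      rw [List.filter_append, List.filter_cons]
      have f1 : l1.filter (fun e => !(e == s)) = l1 :=
        List.filter_eq_self.mpr (fun x hx => by
          simpa using fun h : x = s => hs1 (h ▸ hx))
      have f2 : l2.filter (fun e => !(e == s)) = l2 :=
        List.filter_eq_self.mpr (fun x hx => by
          simpa using fun h : x = s => hs2 (h ▸ hx))
      simp [f1, f2]
    rw [hfil]
    have hne1 : ∀ x ∈ l1, x ≠ s := fun x hx h => hs1 (h ▸ hx)
    have hne2 : ∀ x ∈ l2, x ≠ s := fun x hx h => hs2 (h ▸ hx)
    rw [sorted2_eq_foldl, sorted2_eq_foldl, List.foldl_append, List.foldl_cons]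
    -- step 1: on l1 both comparators agree
    rw [foldl_insertBy_congr (ltOf (keyA1 d (some s)) (keyA2 d (some s)))
          (ltOf (keyB1 d) (keyB2 d)) l1 [] (fun x hx y hy => by
        rcases hy with hy | hy
        · simp [ltOf, keyA1_eq_some_ne d s x (hne1 x hx), keyA2_eq_some_ne d s x (hne1 x hx),
            keyA1_eq_some_ne d s y (hne1 y hy), keyA2_eq_some_ne d s y (hne1 y hy)]
        · cases hy)]
    set X := l1.foldl (fun a x => PySem.List.insertBy (ltOf (keyB1 d) (keyB2 d)) x a) []
      with hX
    have hXmem : ∀ y ∈ X, y ∈ l1 := by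
      intro y hy
      have : y ∈ PySem.List.sorted2 l1 (keyB1 d) (keyB2 d) := by
        rw [sorted2_eq_foldl, ← hX]; exact hy
      exact (PySem.List.sorted2_perm l1 (keyB1 d) (keyB2 d) false).mem_iff.mp this
    -- step 2: s goes to the end of X
    rw [PySem.List.insertBy_of_forall_not_before _ s X
          (fun y hy => ltA_s_y d s y (hne1 y (hXmem y hy)) hs)]
    -- step 3: s stays last while l2 is inserted
    rw [foldl_insertBy_last _ s l2 X (fun x hx => ltA_x_s d s x (hne2 x hx) hs)]
    -- step 4: on l2 both comparators agree
    rw [foldl_insertBy_congr (ltOf (keyA1 d (some s)) (keyA2 d (some s)))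
          (ltOf (keyB1 d) (keyB2 d)) l2 X (fun x hx y hy => by
        have hys : y ≠ s := by
          rcases hy with hy | hy
          · exact hne2 y hy
          · exact hne1 y (hXmem y hy)
        simp [ltOf, keyA1_eq_some_ne d s x (hne2 x hx), keyA2_eq_some_ne d s x (hne2 x hx),
          keyA1_eq_some_ne d s y hys, keyA2_eq_some_ne d s y hys])]
    rw [hX, ← List.foldl_append]

-- A's sorted element list equals B's order expression
lemma els_eq (d : PySem.Dict (List Int) String) (E : List (List Int)) (hN : E.Nodup) :
    PySem.List.sorted2 E (keyA1 d (sinkOf E)) (keyA2 d (sinkOf E)) =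
      (match sinkOfB E with
       | some s =>
         if !(d.getD s "" == "") then
           PySem.List.sorted2 (E.filter (fun e => !(e == s))) (keyB1 d) (keyB2 d) ++ [s]
         else PySem.List.sorted2 E (keyB1 d) (keyB2 d)
       | none => PySem.List.sorted2 E (keyB1 d) (keyB2 d)) := by
  rw [← sink_eq]
  cases h : sinkOf E with
  | none => exact order_eq_none d E
  | some s =>
    have hsE : s ∈ E := List.mem_of_find?_eq_some h
    exact order_eq_some d E hN s hsE

lemma ports_eq (reps : List (List Int × String)) :
    build_multiplication_table reps = build_multiplication_table_alt reps := by
  simp only [build_multiplication_table, build_multiplication_table_alt]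
  rw [← els_eq (PySem.Dict.ofList reps) (PySem.Dict.ofList reps).keys
        (PySem.Dict.nodup_keys_ofList reps)]
  refine Prod.ext ?_ rfl
  rw [pyMul_eq]
  rw [PySem.List.foldl_append_singleton_eq_map, List.nil_append]
  apply List.map_congr_left
  intro f _
  rw [PySem.List.foldl_append_singleton_eq_map, List.nil_append]

-- ===== VERDICT (by name: the statement is the Claim_ definition above) =====
theorem build_multiplication_table_spec : Claim_equal_build_multiplication_table := by
  intro reps _ _
  unfold Spec_build_multiplication_table
  exact ports_eq reps
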